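-- pv_equiv track=rewrite | github.com/artTerexov/InfEGE | 2022/Alexandra/task27/2673.py | func
-- ===== SOURCE A (Python) =====
-- def func(s):
--     L = 7
--     s.pop(0)
--     queue = [s[i] for i in range(L)]
--
--     count = 0
--     D = [[0, 0], [0, 0]]
--     for i in range(L, len(s)):
--         a = queue.pop(0)
--         ind2 = 0 if a % 2 == 0 else 1
--         ind7 = 0 if a % 7 == 0 else 1
--         D[0][0] += 1
--         D[0][1] += (1 - ind7)
--         D[1][0] += (1 - ind2)
--         D[1][1] += (1 - ind2) * (1 - ind7)
--         x = s[i]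
--         queue.append(x)
--         ind2 = 0 if x % 2 == 0 else 1
--         ind7 = 0 if x % 7 == 0 else 1
--         count += D[ind2][ind7]
--
--     return count
-- ===== SOURCE B (Python) =====
-- def func(s):
--     # Same count as A; like A, removes the first element of s in place.
--     # Instead of A's 2x2 table of running class counters, keep the list of
--     # elements that have left the 7-wide window and rescan it for each new element.
--     s.pop(0)
--     queue = [s[i] for i in range(7)]
--     eligible = []
--     count = 0
--     for i in range(7, len(s)):
--         eligible.append(queue.pop(0))
--         x = s[i]
--         queue.append(x)
--         for a in eligible:
--             if (x % 2 == 0 or a % 2 == 0) and (x % 7 == 0 or a % 7 == 0):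
--                 count += 1
--     return count
-- ===== Notes on version B (the rewrite author's own statement) =====
-- stated objective: alternative
-- what changed: A maintains a 2x2 table of running parity/divisible-by-7 class counters so each new element is counted in O(1); B instead keeps the growing list of elements that have left the 7-wide window and rescans that whole list for every new element, testing the pair condition directly.
import Mathlib
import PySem

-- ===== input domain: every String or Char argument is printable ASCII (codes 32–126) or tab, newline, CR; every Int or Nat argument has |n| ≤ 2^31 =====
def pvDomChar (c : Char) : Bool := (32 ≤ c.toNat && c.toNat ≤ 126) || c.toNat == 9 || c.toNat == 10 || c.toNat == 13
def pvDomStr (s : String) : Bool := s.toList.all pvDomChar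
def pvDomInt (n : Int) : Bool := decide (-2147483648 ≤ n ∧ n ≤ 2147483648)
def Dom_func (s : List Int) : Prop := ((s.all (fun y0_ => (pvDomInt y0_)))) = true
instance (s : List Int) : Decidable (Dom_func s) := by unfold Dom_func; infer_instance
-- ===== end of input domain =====

-- B replaces A's 2×2 table of running class counters (O(1) per element) by a growing
-- list of the elements that have left the 7-wide window, rescanned for every new element.
-- Both A and B mutate s in place (s.pop(0)); the equivalence proved is about the return value.

-- ===== PORT A =====
-- one iteration of A's loop; state = (queue, count, D00, D01, D10, D11)
def funcStep (t : List Int) (st : List Int × Int × Int × Int × Int × Int) (i : Int) :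
    List Int × Int × Int × Int × Int × Int :=
  let queue := st.1
  let count := st.2.1
  let a := PySem.List.pyGetD queue 0 0        -- a = queue.pop(0)
  let queue := queue.drop 1
  let ind2a : Int := if PySem.Int.mod a 2 = 0 then 0 else 1
  let ind7a : Int := if PySem.Int.mod a 7 = 0 then 0 else 1
  let d00 := st.2.2.1 + 1
  let d01 := st.2.2.2.1 + (1 - ind7a)
  let d10 := st.2.2.2.2.1 + (1 - ind2a)
  let d11 := st.2.2.2.2.2 + (1 - ind2a) * (1 - ind7a)
  let x := PySem.List.pyGetD t i 0            -- x = s[i]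
  let queue := queue ++ [x]                   -- queue.append(x)
  let ind2 : Int := if PySem.Int.mod x 2 = 0 then 0 else 1
  let ind7 : Int := if PySem.Int.mod x 7 = 0 then 0 else 1
  let sel := if ind2 = 0 then (if ind7 = 0 then d00 else d01)
             else (if ind7 = 0 then d10 else d11)
  (queue, count + sel, d00, d01, d10, d11)

def func (s : List Int) : Int :=
  let t := s.drop 1                           -- s.pop(0)
  let queue := (PySem.List.pyRange 0 7 1).map (fun i => PySem.List.pyGetD t i 0)
  let fin := (PySem.List.pyRange 7 (t.length : Int) 1).foldl (funcStep t)
               (queue, (0 : Int), (0 : Int), (0 : Int), (0 : Int), (0 : Int))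
  fin.2.1

-- ===== PORT B =====
-- one iteration of B's loop; state = (queue, eligible, count)
def funcAltStep (t : List Int) (st : List Int × List Int × Int) (i : Int) :
    List Int × List Int × Int :=
  let queue := st.1
  let eligible := st.2.1 ++ [PySem.List.pyGetD queue 0 0]  -- eligible.append(queue.pop(0))
  let queue := queue.drop 1
  let x := PySem.List.pyGetD t i 0                         -- x = s[i]
  let queue := queue ++ [x]                                -- queue.append(x)
  let count := eligible.foldl (fun c a =>                  -- for a in eligible: …
      if (PySem.Int.mod x 2 = 0 ∨ PySem.Int.mod a 2 = 0) ∧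
         (PySem.Int.mod x 7 = 0 ∨ PySem.Int.mod a 7 = 0) then c + 1 else c) st.2.2
  (queue, eligible, count)

def func_alt (s : List Int) : Int :=
  let t := s.drop 1                                        -- s.pop(0)
  let queue := (PySem.List.pyRange 0 7 1).map (fun i => PySem.List.pyGetD t i 0)
  let fin := (PySem.List.pyRange 7 (t.length : Int) 1).foldl (funcAltStep t)
               (queue, ([] : List Int), (0 : Int))
  fin.2.2

-- ===== PRECONDITION & SPEC =====
-- Pre_: A pops s[0] and then indexes s[0..6] of the remainder, so it raises
-- IndexError whenever len(s) < 8; exactly those inputs are excluded.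
def Pre_func (s : List Int) : Prop := 8 ≤ s.length
instance (s : List Int) : Decidable (Pre_func s) := by unfold Pre_func; infer_instance

def pvWitness_func : List Int := [1, 2, 3, 4, 5, 6, 7, 14]

def Spec_func (s : List Int) (out : Int) : Prop := out = func_alt s
instance (s : List Int) (out : Int) : Decidable (Spec_func s out) := by unfold Spec_func; infer_instance

-- ===== CLAIM (what is proved, stated in full; the proofs are below) =====
def Claim_equal_func : Prop := ∀ (s : List Int), Dom_func s → Pre_func s → Spec_func s (func s)

-- ===== LEMMAS AND PROOFS =====

-- proof infrastructure
def pvP2 : Int → Bool := fun a => decide ((2:Int) ∣ a)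
def pvP7 : Int → Bool := fun a => decide ((7:Int) ∣ a)
def pvCnt (p : Int → Bool) (t : List Int) (k : Nat) : Int := ((t.take k).countP p : Int)
def pvW (t : List Int) (k : Nat) : List Int :=
  [t.getD k 0, t.getD (k+1) 0, t.getD (k+2) 0, t.getD (k+3) 0,
   t.getD (k+4) 0, t.getD (k+5) 0, t.getD (k+6) 0]
def pvCount (t : List Int) : Nat → Int
  | 0 => 0
  | k+1 => pvCount t k +
      pvCnt (fun a => (pvP2 (t.getD (7+k) 0) || pvP2 a) && (pvP7 (t.getD (7+k) 0) || pvP7 a))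
        t (k+1)

lemma pvCnt_succ (p : Int → Bool) (t : List Int) (k : Nat) (hk : k < t.length) :
    pvCnt p t (k+1) = pvCnt p t k + (if p (t.getD k 0) then 1 else 0) := by
  unfold pvCnt
  rw [List.take_add_one, List.countP_append]
  rw [List.getD_eq_getElem t 0 hk]
  simp [List.getElem?_eq_getElem hk, List.countP_cons]

lemma pvSel (t : List Int) (k : Nat) (hk : k+1 ≤ t.length) (x : Int) :
    (if (if PySem.Int.mod x 2 = 0 then (0:Int) else 1) = 0 then
       if (if PySem.Int.mod x 7 = 0 then (0:Int) else 1) = 0 then (k:Int) + 1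
       else pvCnt pvP7 t k + (1 - if PySem.Int.mod (t.getD k 0) 7 = 0 then 0 else 1)
     else if (if PySem.Int.mod x 7 = 0 then (0:Int) else 1) = 0 then
       pvCnt pvP2 t k + (1 - if PySem.Int.mod (t.getD k 0) 2 = 0 then 0 else 1)
     else pvCnt (fun a => pvP2 a && pvP7 a) t k +
       (1 - if PySem.Int.mod (t.getD k 0) 2 = 0 then 0 else 1) *
         (1 - if PySem.Int.mod (t.getD k 0) 7 = 0 then 0 else 1))
    = pvCnt (fun a => (pvP2 x || pvP2 a) && (pvP7 x || pvP7 a)) t (k+1) := by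
  rw [pvCnt_succ _ _ _ (by omega)]
  unfold pvCnt pvP2 pvP7
  by_cases hx2 : (2:Int) ∣ x <;> by_cases hx7 : (7:Int) ∣ x <;>
    by_cases ha2 : (2:Int) ∣ t[k]?.getD 0 <;>
    by_cases ha7 : (7:Int) ∣ t[k]?.getD 0 <;>
    simp [hx2, hx7, ha2, ha7, List.length_take, List.getD] <;> omega

lemma pv_inv (t : List Int) (k : Nat) (hk : 7 + k ≤ t.length) :
    (PySem.List.pyRange 7 ((7+k : Nat) : Int) 1).foldl (funcStep t)
      ((PySem.List.pyRange 0 7 1).map (fun i => PySem.List.pyGetD t i 0),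
        (0:Int), (0:Int), (0:Int), (0:Int), (0:Int))
    = (pvW t k,
       pvCount t k,
       (k : Int), pvCnt pvP7 t k, pvCnt pvP2 t k,
       pvCnt (fun a => pvP2 a && pvP7 a) t k) := by
  induction k with
  | zero =>
    have h7 : PySem.List.pyRange 7 ((7:Nat):Int) 1 = [] := by decide
    have h07 : PySem.List.pyRange 0 7 1 = [0,1,2,3,4,5,6] := by decide
    rw [h7]
    simp [h07, pvW, pvCnt, pvCount, PySem.List.pyGetD_ofNat']
  | succ k ih =>
    have h1 : ((7+(k+1) : Nat) : Int) = ((7+k : Nat) : Int) + 1 := by push_cast; ring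
    rw [h1, PySem.List.pyRange_one_succ_right (by push_cast; omega), List.foldl_append,
        ih (by omega)]
    simp only [List.foldl_cons, List.foldl_nil]
    -- now compute one funcStep
    rw [funcStep]
    simp only [PySem.List.pyGetD_zero_cons, pvW, List.drop, PySem.List.pyGetD_natCast]
    simp only [Prod.mk.injEq]
    refine ⟨?_, ?_, ?_, ?_, ?_, ?_⟩
    · simp only [List.cons_append, List.nil_append, List.cons.injEq]
      and_intros <;> first | trivial | (congr 1; omega)
    · rw [pvCount]
      congr 1
      exact pvSel t k (by omega) (t.getD (7+k) 0)
    · push_cast; ring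
    · rw [pvCnt_succ _ _ _ (by omega)]
      by_cases ha7 : (7:Int) ∣ t[k]?.getD 0 <;> simp [pvP7, ha7, List.getD]
    · rw [pvCnt_succ _ _ _ (by omega)]
      by_cases ha2 : (2:Int) ∣ t[k]?.getD 0 <;> simp [pvP2, ha2, List.getD]
    · rw [pvCnt_succ _ _ _ (by omega)]
      by_cases ha2 : (2:Int) ∣ t[k]?.getD 0 <;>
        by_cases ha7 : (7:Int) ∣ t[k]?.getD 0 <;>
        simp [pvP2, pvP7, ha2, ha7, List.getD]


lemma pv_invB (t : List Int) (k : Nat) (hk : 7 + k ≤ t.length) :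
    (PySem.List.pyRange 7 ((7+k : Nat) : Int) 1).foldl (funcAltStep t)
      ((PySem.List.pyRange 0 7 1).map (fun i => PySem.List.pyGetD t i 0),
        ([] : List Int), (0:Int))
    = (pvW t k, t.take k, pvCount t k) := by
  induction k with
  | zero =>
    have h7 : PySem.List.pyRange 7 ((7:Nat):Int) 1 = [] := by decide
    have h07 : PySem.List.pyRange 0 7 1 = [0,1,2,3,4,5,6] := by decide
    rw [h7]
    simp [h07, pvW, pvCount, PySem.List.pyGetD_ofNat']
  | succ k ih =>
    have h1 : ((7+(k+1) : Nat) : Int) = ((7+k : Nat) : Int) + 1 := by push_cast; ring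
    rw [h1, PySem.List.pyRange_one_succ_right (by push_cast; omega), List.foldl_append,
        ih (by omega)]
    simp only [List.foldl_cons, List.foldl_nil]
    rw [funcAltStep]
    have htake : t.take k ++ [(pvW t k).getD 0 0] = t.take (k+1) := by
      rw [List.take_add_one, List.getElem?_eq_getElem (by omega : k < t.length)]
      simp [pvW, List.getD_eq_getElem?_getD, List.getElem?_eq_getElem (by omega : k < t.length)]
    simp only [PySem.List.pyGetD_zero_cons, pvW, List.drop, PySem.List.pyGetD_natCast,
      Prod.mk.injEq]
    refine ⟨?_, ?_, ?_⟩
    · simp only [List.cons_append, List.nil_append, List.cons.injEq]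
      and_intros <;> first | trivial | (congr 1; omega)
    · simpa [pvW] using htake
    · rw [show (t.take k ++ [t.getD k 0]) = t.take (k+1) by simpa [pvW] using htake]
      rw [PySem.List.foldl_ite_add_one]
      rw [pvCount]
      congr 1
      unfold pvCnt pvP2 pvP7
      congr 1
      refine List.countP_congr ?_
      intro a _
      simp

theorem func_eq (s : List Int) (hpre : Pre_func s) : func s = func_alt s := by
  unfold Pre_func at hpre
  simp only [func, func_alt]
  have ht : 7 ≤ (s.drop 1).length := by simp; omega
  have hlen : ((s.drop 1).length : Int) = ((7 + ((s.drop 1).length - 7) : Nat) : Int) := by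
    congr 1; omega
  rw [hlen, pv_inv (s.drop 1) ((s.drop 1).length - 7) (by omega),
      pv_invB (s.drop 1) ((s.drop 1).length - 7) (by omega)]

-- ===== VERDICT (by name: the statement is the Claim_ definition above) =====
theorem func_spec : Claim_equal_func := by
  intro s _ hpre
  unfold Spec_func
  exact func_eq s hpre
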